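-- pv_equiv track=rewrite | github.com/youngDaLee/algorithm_study | 코테합격자되기/7장/다영/모의테스트/기능개발.py | solution
-- ===== SOURCE A (Python) =====
-- from collections import deque
--
-- def solution(progress, speeds):
--     progress = deque(progress)
--     speeds = deque(speeds)
--
--     days = 0
--     cnt = 0
--     res = []
--     while progress:
--         while (progress[0]+speeds[0]*days < 100):
--             days += 1
--
--         while (progress and progress[0]+speeds[0]*days >= 100):
--             progress.popleft()
--             speeds.popleft()
--             cnt += 1
--
--         res.append(cnt)
--         cnt = 0
--
--     return res
-- ===== SOURCE B (Python) =====
-- def solution(progress, speeds):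
--     finish = [max(0, -(-(100 - p) // s)) for p, s in zip(progress, speeds)]
--     res = []
--     deadline = None
--     cnt = 0
--     for f in finish:
--         if deadline is None:
--             deadline = f
--             cnt = 1
--         elif f > deadline:
--             res.append(cnt)
--             deadline = f
--             cnt = 1
--         else:
--             cnt += 1
--     if cnt:
--         res.append(cnt)
--     return res
-- ===== Notes on version B (the rewrite author's own statement) =====
-- stated objective: simpler
-- what changed: B precomputes each job's finish day once with integer ceiling division and then makes a single grouping scan over that table, instead of A's deque simulation that advances a day counter one day at a time in a nested while loop.
-- outside the precondition, e.g. on solution([100], [0]): A returns [1], B raises ZeroDivisionError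
import Mathlib
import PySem

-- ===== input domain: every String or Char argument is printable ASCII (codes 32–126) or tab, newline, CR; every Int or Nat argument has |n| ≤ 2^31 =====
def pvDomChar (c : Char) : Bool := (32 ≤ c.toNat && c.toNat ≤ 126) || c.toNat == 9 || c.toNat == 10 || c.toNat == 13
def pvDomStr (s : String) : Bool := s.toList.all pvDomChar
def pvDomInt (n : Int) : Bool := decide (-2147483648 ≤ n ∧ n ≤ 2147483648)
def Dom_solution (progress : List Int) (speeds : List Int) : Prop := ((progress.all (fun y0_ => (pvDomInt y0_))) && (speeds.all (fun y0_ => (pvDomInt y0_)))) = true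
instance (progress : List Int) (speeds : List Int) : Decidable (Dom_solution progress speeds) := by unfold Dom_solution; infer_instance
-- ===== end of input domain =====

-- B replaces A's day-by-day deque simulation by a precomputed finish-day table
-- (integer ceiling division) followed by one grouping scan; objective: simpler.

-- ===== PORT A =====
-- inner `while progress[0]+speeds[0]*days < 100: days += 1`; the fuel argument
-- only makes the loop total (it is sufficient whenever the Python loop terminates)
def pvAdvance (p s days : Int) : Nat → Int
  | 0 => days
  | Nat.succ fuel => if p + s * days < 100 then pvAdvance p s (days + 1) fuel else days

-- inner `while progress and progress[0]+speeds[0]*days >= 100: popleft; cnt += 1`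
def pvPop (days : Int) : List Int → List Int → Int → Int × List Int × List Int
  | p :: ps, s :: ss, cnt =>
      if 100 ≤ p + s * days then pvPop days ps ss (cnt + 1) else (cnt, p :: ps, s :: ss)
  | ps, ss, cnt => (cnt, ps, ss)

-- outer `while progress:`; the Nat fuel only makes the loop total (one unit per
-- iteration suffices under Pre_, where each iteration pops at least one element);
-- the `_ :: _, []` case is Python's IndexError (excluded by Pre_)
def pvOuter : Nat → List Int → List Int → Int → List Int
  | _, [], _, _ => []
  | 0, _ :: _, _, _ => []
  | Nat.succ fuel, p :: ps, s :: ss, days =>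
      let days' := pvAdvance p s days (100 - p - s * days).toNat
      let r := pvPop days' (p :: ps) (s :: ss) 0
      r.1 :: pvOuter fuel r.2.1 r.2.2 days'
  | Nat.succ _, _ :: _, [], _ => []

def solution (progress : List Int) (speeds : List Int) : List Int :=
  pvOuter (progress.length + 1) progress speeds 0

-- ===== PORT B =====
-- max(0, -(-(100 - p) // s))
def pvFinish (p s : Int) : Int := max 0 (-(PySem.Int.floordiv (-(100 - p)) s))

-- the grouping for-loop of Source B, state = (deadline, cnt, res)
def pvScan : List Int → Option Int → Int → List Int → List Int
  | [], _, cnt, res => if cnt ≠ 0 then res ++ [cnt] else res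
  | f :: fs, none, _, res => pvScan fs (some f) 1 res
  | f :: fs, some d, cnt, res =>
      if d < f then pvScan fs (some f) 1 (res ++ [cnt]) else pvScan fs (some d) (cnt + 1) res

def solution_alt (progress : List Int) (speeds : List Int) : List Int :=
  pvScan ((progress.zip speeds).map (fun x => pvFinish x.1 x.2)) none 0 []

-- ===== PRECONDITION & SPEC =====
-- Pre_ excludes inputs where Python A raises IndexError (fewer speeds than progress
-- entries) or does not terminate (a nonpositive speed paired with unfinished work);
-- it also excludes nonpositive speeds paired with already-finished work (p ≥ 100),
-- where A happens to return but B's ceiling division is undefined (s = 0) — see cites.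
def Pre_solution (progress : List Int) (speeds : List Int) : Prop :=
  progress.length ≤ speeds.length ∧ ∀ s ∈ speeds.take progress.length, 1 ≤ s

instance (progress : List Int) (speeds : List Int) : Decidable (Pre_solution progress speeds) := by
  unfold Pre_solution; infer_instance

def pvWitness_solution : List Int × List Int := ([93, 30, 55, 60, 40, 95], [1, 30, 5, 10, 60, 7])

def Spec_solution (progress : List Int) (speeds : List Int) (out : List Int) : Prop := out = solution_alt progress speeds
instance (progress : List Int) (speeds : List Int) (out : List Int) : Decidable (Spec_solution progress speeds out) := by unfold Spec_solution; infer_instance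

-- ===== CLAIM (what is proved, stated in full; the proofs are below) =====
def Claim_equal_solution : Prop := ∀ (progress : List Int) (speeds : List Int), Dom_solution progress speeds → Pre_solution progress speeds → Spec_solution progress speeds (solution progress speeds)

-- ===== LEMMAS AND PROOFS =====

-- reference grouping of a finish-day list (proof-side specification)
def pvGo : List Int → Int → Int → List Int
  | [], _, c => [c]
  | f :: fs, d, c => if d < f then c :: pvGo fs f 1 else pvGo fs d (c + 1)

def pvGC : List Int → List Int
  | [] => []
  | f :: fs => pvGo fs f 1

theorem pvFinish_nonneg (p s : Int) : 0 ≤ pvFinish p s := le_max_left _ _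

-- the key arithmetic bridge: for positive speed and a nonnegative day,
-- "done by day d" ⟺ "finish day ≤ d"
theorem pvFinish_le_iff (p s d : Int) (hs : 1 ≤ s) (hd : 0 ≤ d) :
    pvFinish p s ≤ d ↔ 100 ≤ p + s * d := by
  unfold pvFinish
  rw [max_le_iff]
  have h1 : -d ≤ PySem.Int.floordiv (-(100 - p)) s ↔ -d * s ≤ -(100 - p) :=
    PySem.Int.le_floordiv_iff_mul_le (by omega)
  constructor
  · rintro ⟨-, h⟩
    have := h1.mp (by omega)
    nlinarith
  · intro h
    refine ⟨hd, ?_⟩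
    have : -d * s ≤ -(100 - p) := by nlinarith
    have := h1.mpr this
    omega

theorem pvAdvance_eq (p s : Int) (hs : 1 ≤ s) :
    ∀ (fuel : Nat) (d : Int), 0 ≤ d → (100 - p - s * d).toNat ≤ fuel →
      pvAdvance p s d fuel = max d (pvFinish p s) := by
  intro fuel
  induction fuel with
  | zero =>
      intro d hd hf
      simp only [pvAdvance]
      have hle : pvFinish p s ≤ d := (pvFinish_le_iff p s d hs hd).mpr (by omega)
      omega
  | succ fuel ih =>
      intro d hd hf
      simp only [pvAdvance]
      split_ifs with h
      · have hsd : s * (d + 1) = s * d + s := by ring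
        have := ih (d + 1) (by omega) (by omega)
        rw [this]
        have hgt : ¬ pvFinish p s ≤ d := by
          rw [pvFinish_le_iff p s d hs hd]; omega
        omega
      · have hle : pvFinish p s ≤ d := (pvFinish_le_iff p s d hs hd).mpr (by omega)
        omega

theorem pvPop_eq (d : Int) (hd : 0 ≤ d) :
    ∀ (ps ss : List Int) (cnt : Int), ps.length ≤ ss.length →
      (∀ x ∈ ps.zip ss, 1 ≤ x.2) →
      pvPop d ps ss cnt =
        (cnt + ((((ps.zip ss).map (fun x => pvFinish x.1 x.2)).takeWhile
                  (fun f => decide (f ≤ d))).length : Int),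
         ps.drop ((((ps.zip ss).map (fun x => pvFinish x.1 x.2)).takeWhile
                  (fun f => decide (f ≤ d))).length),
         ss.drop ((((ps.zip ss).map (fun x => pvFinish x.1 x.2)).takeWhile
                  (fun f => decide (f ≤ d))).length)) := by
  intro ps
  induction ps with
  | nil => intro ss cnt _ _; simp [pvPop]
  | cons p tp ih =>
      intro ss cnt hlen hpos
      cases ss with
      | nil => simp at hlen
      | cons s ts =>
          have hs : 1 ≤ s := hpos (p, s) (by simp)
          simp only [List.zip_cons_cons, List.map_cons, List.takeWhile]
          by_cases hdone : 100 ≤ p + s * d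
          · have : pvFinish p s ≤ d := (pvFinish_le_iff p s d hs hd).mpr hdone
            simp only [pvPop, if_pos hdone, this, decide_true]
            rw [ih ts (cnt + 1) (by simpa using hlen) (fun x hx => hpos x (by simp [hx]))]
            simp only [List.length_cons, List.drop_succ_cons]
            simp only [Prod.mk.injEq]
            exact ⟨by push_cast; omega, by simp⟩
          · have : ¬ pvFinish p s ≤ d := by rw [pvFinish_le_iff p s d hs hd]; exact hdone
            simp only [pvPop, if_neg hdone, this, decide_false]
            simp

theorem pvScan_eq_go : ∀ (fs : List Int) (d c : Int) (res : List Int), 1 ≤ c →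
    pvScan fs (some d) c res = res ++ pvGo fs d c := by
  intro fs
  induction fs with
  | nil => intro d c res hc; simp [pvScan, pvGo]; omega
  | cons f tf ih =>
      intro d c res hc
      simp only [pvScan, pvGo]
      split_ifs with h
      · rw [ih f 1 (res ++ [c]) (by omega)]; simp
      · rw [ih d (c + 1) res (by omega)]

theorem pvGo_append (fs₁ : List Int) : ∀ (fs₂ : List Int) (d c : Int),
    (∀ f ∈ fs₁, f ≤ d) →
    pvGo (fs₁ ++ fs₂) d c = pvGo fs₂ d (c + (fs₁.length : Int)) := by
  induction fs₁ with
  | nil => intro fs₂ d c _; simp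
  | cons f tf ih =>
      intro fs₂ d c hall
      have hf : f ≤ d := hall f (by simp)
      simp only [List.cons_append, pvGo, if_neg (by omega : ¬ d < f)]
      rw [ih fs₂ d (c + 1) (fun g hg => hall g (by simp [hg]))]
      simp only [List.length_cons]
      congr 1
      push_cast
      omega

theorem pv_zip_drop : ∀ (ps ss : List Int) (k : Nat),
    (ps.drop k).zip (ss.drop k) = (ps.zip ss).drop k := by
  intro ps
  induction ps with
  | nil => intro ss k; simp
  | cons p tp ih =>
      intro ss k
      cases ss with
      | nil => simp
      | cons s ts =>
          cases k with
          | zero => simp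
          | succ k => simpa using ih ts k

theorem pv_dropWhile_eq_drop {α : Type} (q : α → Bool) :
    ∀ (l : List α), l.dropWhile q = l.drop (l.takeWhile q).length := by
  intro l
  induction l with
  | nil => simp
  | cons a t ih =>
      by_cases h : q a = true
      · simpa [List.dropWhile, List.takeWhile, h] using ih
      · simp [List.dropWhile, List.takeWhile, h]

theorem pvOuter_eq_pvGC : ∀ (fuel : Nat) (ps ss : List Int) (d : Int),
    ps.length < fuel → ps.length ≤ ss.length →
    (∀ x ∈ ps.zip ss, 1 ≤ x.2) → 0 ≤ d →
    (∀ f, ((ps.zip ss).map (fun x => pvFinish x.1 x.2)).head? = some f → d ≤ f) →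
    pvOuter fuel ps ss d = pvGC ((ps.zip ss).map (fun x => pvFinish x.1 x.2)) := by
  intro fuel
  induction fuel with
  | zero => intro ps ss d h; omega
  | succ fuel ih =>
      intro ps ss d hfuel hlen hpos hd hhd
      cases ps with
      | nil => simp [pvOuter, pvGC]
      | cons p tp =>
          cases ss with
          | nil => simp at hlen
          | cons s ts =>
              have hs : 1 ≤ s := hpos (p, s) (by simp)
              have hdle : d ≤ pvFinish p s := hhd _ (by simp)
              have hf0 : 0 ≤ pvFinish p s := pvFinish_nonneg p s
              simp only [pvOuter]
              rw [pvAdvance_eq p s hs _ d hd (by omega)]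
              rw [max_eq_right hdle]
              set f₀ := pvFinish p s with hf₀
              rw [pvPop_eq f₀ hf0 (p :: tp) (s :: ts) 0 hlen hpos]
              -- the head of the finish list passes the takeWhile test
              simp only [List.zip_cons_cons, List.map_cons, List.takeWhile_cons]
              rw [if_pos (by simp [hf₀] : (decide (pvFinish p s ≤ f₀)) = true)]
              set fs' := (tp.zip ts).map (fun x => pvFinish x.1 x.2) with hfs'
              set q : Int → Bool := fun f => decide (f ≤ f₀) with hq
              set k : Nat := (fs'.takeWhile q).length with hk
              simp only [List.length_cons, List.drop_succ_cons]
              have hall : ∀ f ∈ fs'.takeWhile q, f ≤ f₀ := by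
                intro f hf
                have := List.mem_takeWhile_imp hf
                simpa [hq] using this
              have hktw : (fs'.takeWhile q).length = k := rfl
              have hsplit : fs' = fs'.takeWhile q ++ fs'.dropWhile q :=
                (List.takeWhile_append_dropWhile).symm
              have hdrop : fs'.dropWhile q = fs'.drop k := by
                rw [pv_dropWhile_eq_drop q fs', hktw]
              have hklen : k ≤ fs'.length := by
                rw [hk]; exact List.Sublist.length_le (List.takeWhile_sublist _)
              have hlen' : fs'.length = (tp.zip ts).length := by simp [hfs']
              have htplen : (tp.zip ts).length ≤ tp.length := by
                simp [List.length_zip]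
              -- rewrite the recursive call via the IH
              have hdrop_zip : (tp.drop k).zip (ts.drop k) = (tp.zip ts).drop k :=
                pv_zip_drop tp ts k
              have hmapdrop : ((tp.zip ts).drop k).map (fun x => pvFinish x.1 x.2)
                  = fs'.drop k := by
                rw [hfs', List.map_drop]
              have hrec : pvOuter fuel (tp.drop k) (ts.drop k) f₀
                  = pvGC (fs'.drop k) := by
                rw [← hmapdrop, ← hdrop_zip]
                refine ih _ _ _ ?_ ?_ ?_ hf0 ?_
                · simp only [List.length_drop]
                  simp only [List.length_cons] at hfuel
                  omega
                · simp only [List.length_drop]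
                  simp only [List.length_cons] at hlen
                  omega
                · intro x hx
                  rw [hdrop_zip] at hx
                  have hmem : x ∈ tp.zip ts := List.mem_of_mem_drop hx
                  exact hpos x (by simp only [List.zip_cons_cons, List.mem_cons]; exact Or.inr hmem)
                · intro f hf
                  rw [hdrop_zip, hmapdrop, ← hdrop] at hf
                  have hqf : q f = false := by
                    have h1 := List.head?_dropWhile_not q fs'
                    rw [hf] at h1
                    simpa using h1
                  simp only [hq, decide_eq_false_iff_not, not_le] at hqf
                  omega
              rw [hktw, hrec]
              have hgoal : pvGC (pvFinish p s :: fs') = pvGo fs' f₀ 1 := by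
                rw [← hf₀]
                rfl
              rw [hgoal]
              conv_rhs => rw [hsplit]
              rw [pvGo_append (fs'.takeWhile q) (fs'.dropWhile q) f₀ 1 hall, hktw, hdrop]
              cases hrest : fs'.drop k with
              | nil =>
                  simp only [pvGC, pvGo, List.cons.injEq, and_true]
                  push_cast
                  omega
              | cons r rest' =>
                  have hqr : q r = false := by
                    have h1 := List.head?_dropWhile_not q fs'
                    rw [hdrop, hrest] at h1
                    simpa using h1
                  simp only [hq, decide_eq_false_iff_not, not_le] at hqr
                  simp only [pvGC, pvGo, if_pos hqr, List.cons.injEq]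
                  refine ⟨by push_cast; omega, by trivial⟩

theorem solution_alt_eq_pvGC (progress speeds : List Int) :
    solution_alt progress speeds = pvGC ((progress.zip speeds).map (fun x => pvFinish x.1 x.2)) := by
  unfold solution_alt
  cases h : (progress.zip speeds).map (fun x => pvFinish x.1 x.2) with
  | nil => simp [pvScan, pvGC]
  | cons f fs =>
      simp only [pvScan, pvGC]
      rw [pvScan_eq_go fs f 1 [] (by omega)]
      simp

theorem pv_zip_snd_mem_take : ∀ (ps ss : List Int) (x : Int × Int),
    x ∈ ps.zip ss → x.2 ∈ ss.take ps.length := by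
  intro ps
  induction ps with
  | nil => intro ss x hx; simp at hx
  | cons p tp ih =>
      intro ss x hx
      cases ss with
      | nil => simp at hx
      | cons s ts =>
          simp only [List.zip_cons_cons, List.mem_cons] at hx
          rcases hx with h | h
          · subst h; simp
          · simp only [List.length_cons, List.take_succ_cons, List.mem_cons]
            exact Or.inr (ih ts x h)

-- ===== VERDICT (by name: the statement is the Claim_ definition above) =====
theorem solution_spec : Claim_equal_solution := by
  intro progress speeds _ hpre
  unfold Spec_solution
  obtain ⟨hlen, hpos⟩ := hpre
  rw [solution_alt_eq_pvGC]
  unfold solution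
  apply pvOuter_eq_pvGC
  · omega
  · exact hlen
  · intro x hx
    exact hpos x.2 (pv_zip_snd_mem_take progress speeds x hx)
  · omega
  · intro f hf
    cases hzip : progress.zip speeds with
    | nil => rw [hzip] at hf; simp at hf
    | cons x t =>
        rw [hzip] at hf
        simp only [List.map_cons, List.head?_cons, Option.some.injEq] at hf
        subst hf
        exact pvFinish_nonneg _ _
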